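-- pv_equiv track=rewrite | github.com/our-study/able_coding_master | SeokEunkyu/중급/sol057.py | calculate_additional_at_bats
-- ===== SOURCE A (Python) =====
-- def calculate_additional_at_bats(X, Y):
--     # 현재 타율 계산
--     current_average = Y * 10 // X  # 현재 타율의 할, 푼 부분만 사용
--     additional_at_bats = 0
--
--     # 최대 1,000,000,000번의 타석에 대해 반복
--     while additional_at_bats <= 1000000000:
--         new_at_bats = X + additional_at_bats
--         new_hits = Y + additional_at_bats
--
--         # 새로운 타율 계산
--         new_average = new_hits * 10 // new_at_bats
--
--         # 타율이 오르면 결과를 반환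
--         if new_average > current_average:
--             return additional_at_bats
--
--         additional_at_bats += 1
--
--     # 타율이 오르지 않으면 -1 반환
--     return -1
-- ===== SOURCE B (Python) =====
-- def calculate_additional_at_bats(X, Y):
--     # Closed form: smallest k with (Y+k)*10 // (X+k) > Y*10 // X, via ceiling division.
--     c = Y * 10 // X + 1  # target average (current + 1)
--     if c >= 10:
--         return -1  # average can never strictly rise past 9.x when hits >= at-bats
--     k = -((10 * Y - c * X) // (10 - c))  # ceil((c*X - 10*Y) / (10 - c))
--     return k if k <= 1000000000 else -1
-- ===== Notes on version B (the rewrite author's own statement) =====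
-- stated objective: faster
-- what changed: Replaced A's linear scan of up to 10^9 candidate at-bat counts by an O(1) closed form: the success condition is a linear inequality in k, so the answer is a single ceiling division (or -1 when the target average c >= 10 is unreachable).
-- outside the precondition, e.g. on calculate_additional_at_bats(-5, -7): A returns 1, B returns -1; on calculate_additional_at_bats(0, 5): A raises ZeroDivisionError, B raises ZeroDivisionError
import Mathlib
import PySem

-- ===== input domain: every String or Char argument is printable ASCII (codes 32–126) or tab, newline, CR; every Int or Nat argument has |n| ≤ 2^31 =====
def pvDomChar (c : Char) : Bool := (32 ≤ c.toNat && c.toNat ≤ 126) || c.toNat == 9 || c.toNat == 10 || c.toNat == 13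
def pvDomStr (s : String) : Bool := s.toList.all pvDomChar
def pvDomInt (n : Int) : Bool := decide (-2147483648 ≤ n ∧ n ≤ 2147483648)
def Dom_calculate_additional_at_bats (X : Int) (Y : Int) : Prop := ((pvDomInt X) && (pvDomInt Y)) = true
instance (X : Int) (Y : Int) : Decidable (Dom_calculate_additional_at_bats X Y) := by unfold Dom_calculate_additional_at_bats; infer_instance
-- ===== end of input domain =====

-- B replaces A's O(answer) linear scan (up to 10^9 iterations) by an O(1) closed-form
-- ceiling division derived from the monotonicity of the floored average; objective: faster.


-- ===== PORT A =====
-- the while-loop of A, transliterated: k is `additional_at_bats`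
def calcLoopA (X : Int) (Y : Int) (cur : Int) (k : Int) : Int :=
  if h : k ≤ 1000000000 then
    if PySem.Int.floordiv ((Y + k) * 10) (X + k) > cur then k
    else calcLoopA X Y cur (k + 1)
  else -1
termination_by (1000000001 - k).toNat
decreasing_by omega

def calculate_additional_at_bats (X : Int) (Y : Int) : Int :=
  let current_average := PySem.Int.floordiv (Y * 10) X
  calcLoopA X Y current_average 0

-- ===== PORT B =====
def calculate_additional_at_bats_alt (X : Int) (Y : Int) : Int :=
  let c := PySem.Int.floordiv (Y * 10) X + 1
  if c ≥ 10 then -1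
  else
    let k := -(PySem.Int.floordiv (10 * Y - c * X) (10 - c))
    if k ≤ 1000000000 then k else -1

-- ===== PRECONDITION & SPEC =====
-- Pre_ restricts to the problem's natural domain of a positive at-bat count X: for X ≤ 0
-- A raises ZeroDivisionError (X = 0, or when X + k reaches 0) or returns values that are
-- artifacts of floor division with a negative denominator.
def Pre_calculate_additional_at_bats (X : Int) (Y : Int) : Prop := 0 < X
instance (X : Int) (Y : Int) : Decidable (Pre_calculate_additional_at_bats X Y) := by unfold Pre_calculate_additional_at_bats; infer_instance

def pvWitness_calculate_additional_at_bats : Int × Int := (3, 1)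

def Spec_calculate_additional_at_bats (X : Int) (Y : Int) (out : Int) : Prop := out = calculate_additional_at_bats_alt X Y
instance (X : Int) (Y : Int) (out : Int) : Decidable (Spec_calculate_additional_at_bats X Y out) := by unfold Spec_calculate_additional_at_bats; infer_instance

-- ===== CLAIM (what is proved, stated in full; the proofs are below) =====
def Claim_equal_calculate_additional_at_bats : Prop := ∀ (X : Int) (Y : Int), Dom_calculate_additional_at_bats X Y → Pre_calculate_additional_at_bats X Y → Spec_calculate_additional_at_bats X Y (calculate_additional_at_bats X Y)

-- ===== LEMMAS AND PROOFS =====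

-- Characterization of the loop's success condition for X > 0, k ≥ 0:
-- new_average > cur  ↔  c ≤ 10(Y+k) compared against c(X+k), i.e. a linear inequality in k.
theorem cond_iff (X Y cur k : Int) (hX : 0 < X) (hk : 0 ≤ k)
    (hcur : cur = PySem.Int.floordiv (Y * 10) X) :
    (PySem.Int.floordiv ((Y + k) * 10) (X + k) > cur) ↔
      ((cur + 1) ≤ 10 - 1 ∧ -(PySem.Int.floordiv (10 * Y - (cur + 1) * X) (10 - (cur + 1))) ≤ k) := by
  set c := cur + 1 with hc
  have hb : (0 : Int) < X + k := by omega
  have h1 : (PySem.Int.floordiv ((Y + k) * 10) (X + k) > cur) ↔ c * (X + k) ≤ (Y + k) * 10 := by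
    constructor
    · intro h
      have := (PySem.Int.le_floordiv_iff_mul_le (a := (Y + k) * 10) (b := X + k) (q := c) hb).mp (by omega)
      exact this
    · intro h
      have := (PySem.Int.le_floordiv_iff_mul_le (a := (Y + k) * 10) (b := X + k) (q := c) hb).mpr h
      omega
  -- from cur = floor(10Y/X):  cur*X ≤ 10Y < c*X
  have hfl : cur * X ≤ Y * 10 ∧ Y * 10 < (cur + 1) * X := by
    have := (PySem.Int.floordiv_eq_iff_of_pos (a := Y * 10) (b := X) (q := cur) hX).mp hcur.symm
    exact this
  rw [h1]
  constructor
  · intro h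
    -- c(X+k) ≤ 10(Y+k)  ⟺  (c-10)k ≤ 10Y - cX < 0, forcing c < 10 (since k ≥ 0)
    have hlt : c * X > 10 * Y := by nlinarith [hfl.2]
    have hc10 : c ≤ 9 := by nlinarith
    refine ⟨by omega, ?_⟩
    have hq : (0 : Int) < 10 - c := by omega
    rw [show -(PySem.Int.floordiv (10 * Y - c * X) (10 - c)) ≤ k ↔
          -k ≤ PySem.Int.floordiv (10 * Y - c * X) (10 - c) by omega]
    rw [PySem.Int.le_floordiv_iff_mul_le hq]
    nlinarith
  · rintro ⟨hc10, hk0⟩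
    have hq : (0 : Int) < 10 - c := by omega
    have hq' : -k ≤ PySem.Int.floordiv (10 * Y - c * X) (10 - c) := by omega
    have := (PySem.Int.le_floordiv_iff_mul_le (a := 10 * Y - c * X) (b := 10 - c) (q := -k) hq).mp hq'
    nlinarith

-- The loop returns the least k ≥ start satisfying the (monotone) condition, capped at 10^9.
theorem calcLoopA_eq (X Y cur k0 : Int) (hX : 0 < X)
    (hcur : cur = PySem.Int.floordiv (Y * 10) X)
    (hk0 : cur + 1 ≤ 9 → 0 < k0)
    (hk0def : k0 = -(PySem.Int.floordiv (10 * Y - (cur + 1) * X) (10 - (cur + 1)))) :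
    ∀ (k : Int), 0 ≤ k → (cur + 1 ≤ 9 → k ≤ k0) →
      calcLoopA X Y cur k = if cur + 1 ≤ 9 ∧ k0 ≤ 1000000000 then k0 else -1 := by
  intro k
  induction k using calcLoopA.induct (X := X) (Y := Y) (cur := cur) with
  | case1 k h hcond =>
    intro hk hkle
    have hiff := (cond_iff X Y cur k hX hk hcur)
    rw [hk0def] at hkle
    have : cur + 1 ≤ 10 - 1 ∧ -(PySem.Int.floordiv (10 * Y - (cur + 1) * X) (10 - (cur + 1))) ≤ k :=
      hiff.mp hcond
    rw [calcLoopA]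
    simp only [h, dite_true, hcond, if_true]
    rw [hk0def]
    have hke : k = -(PySem.Int.floordiv (10 * Y - (cur + 1) * X) (10 - (cur + 1))) := by
      have := hkle (by omega); omega
    rw [if_pos ⟨by omega, by omega⟩]
    omega
  | case2 k h hcond ih =>
    intro hk hkle
    have hiff := (cond_iff X Y cur k hX hk hcur)
    rw [calcLoopA]
    simp only [h, dite_true, hcond, if_false]
    apply ih (by omega)
    intro hc9
    have hkle' := hkle hc9
    have : ¬ (cur + 1 ≤ 10 - 1 ∧ -(PySem.Int.floordiv (10 * Y - (cur + 1) * X) (10 - (cur + 1))) ≤ k) := by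
      intro hcontra; exact hcond (hiff.mpr hcontra)
    rw [hk0def] at *
    omega
  | case3 k h =>
    intro hk hkle
    rw [calcLoopA]
    simp only [h, dite_false]
    split
    · rename_i hcase
      exfalso
      have := hkle hcase.1
      omega
    · rfl

-- ===== VERDICT (by name: the statement is the Claim_ definition above) =====
theorem calculate_additional_at_bats_spec : Claim_equal_calculate_additional_at_bats := by
  intro X Y _hDom hPre
  unfold Spec_calculate_additional_at_bats
  unfold calculate_additional_at_bats calculate_additional_at_bats_alt
  set cur := PySem.Int.floordiv (Y * 10) X with hcur
  set c := cur + 1 with hc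
  set k0 := -(PySem.Int.floordiv (10 * Y - c * X) (10 - c)) with hk0
  have hX : 0 < X := hPre
  have hk0pos : c ≤ 9 → 0 < k0 := by
    intro hc9
    have hfl : cur * X ≤ Y * 10 ∧ Y * 10 < (cur + 1) * X :=
      (PySem.Int.floordiv_eq_iff_of_pos (a := Y * 10) (b := X) (q := cur) hX).mp rfl
    have hq : (0 : Int) < 10 - c := by omega
    -- k0 ≥ 1 since 10Y - cX < 0 so floor((10Y-cX)/(10-c)) ≤ -1
    have hneg : 10 * Y - c * X < 0 := by nlinarith [hfl.2]
    have : PySem.Int.floordiv (10 * Y - c * X) (10 - c) < 0 := by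
      by_contra habs
      rw [not_lt] at habs
      have := (PySem.Int.le_floordiv_iff_mul_le (a := 10 * Y - c * X) (b := 10 - c) (q := 0) hq).mp habs
      omega
    omega
  have := calcLoopA_eq X Y cur k0 hX hcur hk0pos hk0 0 le_rfl (fun h => le_of_lt (hk0pos h))
  rw [this]
  by_cases h9 : c ≥ 10
  · rw [if_neg (by omega), if_pos h9]
  · dsimp only
    split_ifs <;> omega
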